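-- pv_equiv track=rewrite | github.com/Vincent-Fabioux/checkinbot | src/guess.py | fillMaxOdds
-- ===== SOURCE A (Python) =====
-- def fillMaxOdds(odds, oddsOffset, newValue, possible):
--   maxOdds = -1
--   toFill = []
--   for key, value in odds.items():
--     if (key in possible) and value >= maxOdds:
--       if value > maxOdds:
--         maxOdds = value
--         toFill = [key]
--       else:
--         toFill.append(key)
--
--   if len(toFill) > 1: # Two keys have the highest odds : usage of OddsOffset
--     for key in toFill:
--       if oddsOffset[key] != 0:
--         oddsOffset[key] = 0
--         return {key: newValue}
--     return {toFill[0]: newValue}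
--   elif len(toFill) == 1: # One key have the highest odds
--     oddsOffset[toFill[0]] = 0
--     return {toFill[0]: newValue}
--   else: # No key (wrong call of this function)
--     return None
-- ===== SOURCE B (Python) =====
-- def fillMaxOdds(odds, oddsOffset, newValue, possible):
--   # Two passes: collect the candidates, take the best value, keep the keys that attain it.
--   candidates = [(k, v) for k, v in odds.items() if k in possible]
--   if not candidates:
--     return None
--   maxOdds = max(v for _, v in candidates)
--   toFill = [k for k, v in candidates if v == maxOdds]
--   if len(toFill) == 1:
--     oddsOffset[toFill[0]] = 0
--     return {toFill[0]: newValue}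
--   winner = next((k for k in toFill if oddsOffset[k] != 0), None)
--   if winner is not None:
--     oddsOffset[winner] = 0
--     return {winner: newValue}
--   return {toFill[0]: newValue}
-- ===== Notes on version B (the rewrite author's own statement) =====
-- stated objective: alternative
-- what changed: The interleaved argmax loop that maintains (maxOdds, toFill) with reset/append tie handling is replaced by two independent passes (filter the candidates, take max of their values, filter the keys attaining it), with the tie-break as a first-match search (next) instead of an early-return for loop; Pre_ excludes duplicate-key association lists (dict order accidental) and tied maxima with a key missing from oddsOffset (KeyError).
-- intended difference: On inputs where some key of odds is in possible but every such candidate's value is strictly below -1, A returns None because its maxOdds seed of -1 beats all candidates, while B returns {argmax key: newValue}; B's value is the intended one for 'fill the possible key with the highest odds'. — e.g. on fillMaxOdds([("a", -5)], [], 7, ["a"]): A returns none, B returns some [("a", 7)]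
import Mathlib
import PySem

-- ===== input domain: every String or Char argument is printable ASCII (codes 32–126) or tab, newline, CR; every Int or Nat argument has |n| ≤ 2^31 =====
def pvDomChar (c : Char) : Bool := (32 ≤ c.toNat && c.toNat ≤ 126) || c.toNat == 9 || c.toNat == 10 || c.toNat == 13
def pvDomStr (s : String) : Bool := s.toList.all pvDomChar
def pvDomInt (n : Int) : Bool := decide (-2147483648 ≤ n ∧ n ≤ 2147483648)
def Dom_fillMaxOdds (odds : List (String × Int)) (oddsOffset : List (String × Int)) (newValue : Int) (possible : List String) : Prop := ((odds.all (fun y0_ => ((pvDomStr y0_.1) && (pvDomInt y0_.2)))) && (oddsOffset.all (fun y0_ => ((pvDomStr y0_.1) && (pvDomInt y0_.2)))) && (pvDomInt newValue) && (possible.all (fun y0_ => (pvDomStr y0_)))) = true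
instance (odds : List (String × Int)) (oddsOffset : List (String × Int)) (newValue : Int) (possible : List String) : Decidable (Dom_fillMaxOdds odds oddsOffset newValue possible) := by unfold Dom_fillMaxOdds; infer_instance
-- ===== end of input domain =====

-- B replaces A's single interleaved argmax loop by a candidate filter, a max pass and an
-- equality filter (same cost, different decomposition); on the corner where every candidate's
-- odds are below A's -1 seed, A returns None and B returns the true argmax (stated as D_).
-- Both Pythons mutate oddsOffset the same way; the equivalence proved here is about the
-- RETURN value only.


-- ===== PORT A =====
-- A's tie-break loop: walk toFill, return the first key with a nonzero offset;
-- a missing key is Python's KeyError, modelled as none (excluded by Pre_).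
def fillAOffsetLoop (oddsOffset : List (String × Int)) (newValue : Int) (first : String) : List String → Option (List (String × Int))
  | [] => some [(first, newValue)]
  | k :: rest =>
    match List.lookup k oddsOffset with
    | none => none
    | some v => if v ≠ 0 then some [(k, newValue)] else fillAOffsetLoop oddsOffset newValue first rest

def fillMaxOdds (odds : List (String × Int)) (oddsOffset : List (String × Int)) (newValue : Int) (possible : List String) : Option (List (String × Int)) :=
  let st := odds.foldl (fun (st : Int × List String) kv =>
    if possible.contains kv.1 ∧ kv.2 ≥ st.1 then
      if kv.2 > st.1 then (kv.2, [kv.1]) else (st.1, st.2 ++ [kv.1])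
    else st) (-1, [])
  let toFill := st.2
  if toFill.length > 1 then
    match toFill with
    | t :: _ => fillAOffsetLoop oddsOffset newValue t toFill
    | [] => none
  else if toFill.length = 1 then
    match toFill with
    | t :: _ => some [(t, newValue)]
    | [] => none
  else none

-- ===== PORT B =====
-- B's next(...): first key of the list whose offset is nonzero; some none = not found,
-- none = a missing key (Python KeyError, excluded by Pre_).
def findNonzeroOffset (oddsOffset : List (String × Int)) : List String → Option (Option String)
  | [] => some none
  | k :: rest =>
    match List.lookup k oddsOffset with
    | none => none
    | some v => if v ≠ 0 then some (some k) else findNonzeroOffset oddsOffset rest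

def fillMaxOdds_alt (odds : List (String × Int)) (oddsOffset : List (String × Int)) (newValue : Int) (possible : List String) : Option (List (String × Int)) :=
  let candidates := odds.filter (fun kv => possible.contains kv.1)
  match candidates with
  | [] => none
  | c :: cs =>
    let maxOdds := cs.foldl (fun a kv => max a kv.2) c.2
    let toFill := ((c :: cs).filter (fun kv => kv.2 = maxOdds)).map Prod.fst
    if toFill.length = 1 then
      match toFill with
      | t :: _ => some [(t, newValue)]
      | [] => none
    else
      match findNonzeroOffset oddsOffset toFill with
      | none => none
      | some (some w) => some [(w, newValue)]
      | some none =>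
        match toFill with
        | t :: _ => some [(t, newValue)]
        | [] => none

-- ===== PRECONDITION & SPEC =====
-- Pre_ excludes (a) association lists with duplicate keys in odds/oddsOffset, on which the
-- Python dicts would have collapsed the entries so the list order is accidental, and (b) inputs
-- where two or more candidates tie for the maximum candidate odds and some tied key is missing
-- from oddsOffset, on which the tie-break lookup raises KeyError.
def Pre_fillMaxOdds (odds : List (String × Int)) (oddsOffset : List (String × Int)) (newValue : Int) (possible : List String) : Prop :=
  (odds.map Prod.fst).Nodup ∧ (oddsOffset.map Prod.fst).Nodup ∧
  (odds.all (fun p => odds.all (fun q =>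
    !decide (p ≠ q) || !possible.contains p.1 || !possible.contains q.1 ||
    !odds.all (fun r => !possible.contains r.1 || decide (r.2 ≤ p.2)) || !decide (p.2 = q.2) ||
    (oddsOffset.map Prod.fst).contains p.1))) = true
instance (odds : List (String × Int)) (oddsOffset : List (String × Int)) (newValue : Int) (possible : List String) : Decidable (Pre_fillMaxOdds odds oddsOffset newValue possible) := by unfold Pre_fillMaxOdds; infer_instance

def pvWitness_fillMaxOdds : (List (String × Int)) × (List (String × Int)) × Int × List String :=
  ([("a", 2), ("b", 5), ("c", 5)], [("b", 1), ("c", 0)], 7, ["a", "b", "c"])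

-- On inputs where some key of odds is in possible but every such candidate's odds are strictly
-- below -1, A returns None (its maxOdds seed -1 beats them all) although best-odds candidates
-- exist, while B returns the actual argmax key; B's value is the intended one for "find the
-- possible key with the highest odds".
def D_fillMaxOdds (odds : List (String × Int)) (oddsOffset : List (String × Int)) (newValue : Int) (possible : List String) : Prop :=
  (odds.filter (fun kv => possible.contains kv.1)) ≠ [] ∧
  ((odds.filter (fun kv => possible.contains kv.1)).all (fun kv => kv.2 < -1)) = true
instance (odds : List (String × Int)) (oddsOffset : List (String × Int)) (newValue : Int) (possible : List String) : Decidable (D_fillMaxOdds odds oddsOffset newValue possible) := by unfold D_fillMaxOdds; infer_instance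

def Spec_fillMaxOdds (odds : List (String × Int)) (oddsOffset : List (String × Int)) (newValue : Int) (possible : List String) (out : Option (List (String × Int))) : Prop := ¬ D_fillMaxOdds odds oddsOffset newValue possible → out = fillMaxOdds_alt odds oddsOffset newValue possible
instance (odds : List (String × Int)) (oddsOffset : List (String × Int)) (newValue : Int) (possible : List String) (out : Option (List (String × Int))) : Decidable (Spec_fillMaxOdds odds oddsOffset newValue possible out) := by unfold Spec_fillMaxOdds; infer_instance

def pvDiffWitness_fillMaxOdds : (List (String × Int)) × (List (String × Int)) × Int × List String :=
  ([("a", -5)], [], 7, ["a"])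
def pvDiffWitnessOut_fillMaxOdds : (Option (List (String × Int))) × (Option (List (String × Int))) :=
  (none, some [("a", 7)])

-- ===== CLAIM (what is proved, stated in full; the proofs are below) =====
def Claim_unchanged_fillMaxOdds : Prop := ∀ (odds : List (String × Int)) (oddsOffset : List (String × Int)) (newValue : Int) (possible : List String), Dom_fillMaxOdds odds oddsOffset newValue possible → Pre_fillMaxOdds odds oddsOffset newValue possible → Spec_fillMaxOdds odds oddsOffset newValue possible (fillMaxOdds odds oddsOffset newValue possible)
def Claim_changed_fillMaxOdds : Prop := Dom_fillMaxOdds (pvDiffWitness_fillMaxOdds.1) (pvDiffWitness_fillMaxOdds.2.1) (pvDiffWitness_fillMaxOdds.2.2.1) (pvDiffWitness_fillMaxOdds.2.2.2) ∧ Pre_fillMaxOdds (pvDiffWitness_fillMaxOdds.1) (pvDiffWitness_fillMaxOdds.2.1) (pvDiffWitness_fillMaxOdds.2.2.1) (pvDiffWitness_fillMaxOdds.2.2.2) ∧ D_fillMaxOdds (pvDiffWitness_fillMaxOdds.1) (pvDiffWitness_fillMaxOdds.2.1) (pvDiffWitness_fillMaxOdds.2.2.1) (pvDiffWitness_fillMaxOdds.2.2.2)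 ∧ fillMaxOdds (pvDiffWitness_fillMaxOdds.1) (pvDiffWitness_fillMaxOdds.2.1) (pvDiffWitness_fillMaxOdds.2.2.1) (pvDiffWitness_fillMaxOdds.2.2.2) = pvDiffWitnessOut_fillMaxOdds.1 ∧ fillMaxOdds_alt (pvDiffWitness_fillMaxOdds.1) (pvDiffWitness_fillMaxOdds.2.1) (pvDiffWitness_fillMaxOdds.2.2.1) (pvDiffWitness_fillMaxOdds.2.2.2) = pvDiffWitnessOut_fillMaxOdds.2 ∧ pvDiffWitnessOut_fillMaxOdds.1 ≠ pvDiffWitnessOut_fillMaxOdds.2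
def Claim_exact_fillMaxOdds : Prop := ∀ (odds : List (String × Int)) (oddsOffset : List (String × Int)) (newValue : Int) (possible : List String), Dom_fillMaxOdds odds oddsOffset newValue possible → Pre_fillMaxOdds odds oddsOffset newValue possible → D_fillMaxOdds odds oddsOffset newValue possible → fillMaxOdds odds oddsOffset newValue possible ≠ fillMaxOdds_alt odds oddsOffset newValue possible

-- ===== LEMMAS AND PROOFS =====

-- A's accumulator step, after the candidate test has been factored out.
def pvStepC (st : Int × List String) (kv : String × Int) : Int × List String :=
  if kv.2 ≥ st.1 then
    if kv.2 > st.1 then (kv.2, [kv.1]) else (st.1, st.2 ++ [kv.1])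
  else st

def pvFoldMax (a : Int) (l : List (String × Int)) : Int :=
  l.foldl (fun a kv => max a kv.2) a

-- A's loop over odds equals the same accumulation over the filtered candidate list.
theorem pv_fold_filter (possible : List String) :
    ∀ (l : List (String × Int)) (st : Int × List String),
      l.foldl (fun (st : Int × List String) kv =>
        if possible.contains kv.1 ∧ kv.2 ≥ st.1 then
          if kv.2 > st.1 then (kv.2, [kv.1]) else (st.1, st.2 ++ [kv.1])
        else st) st
      = (l.filter (fun kv => possible.contains kv.1)).foldl pvStepC st := by
  intro l
  induction l with
  | nil => intro st; rfl
  | cons x xs ih =>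
    intro st
    by_cases hx : possible.contains x.1
    · have hx' : x.1 ∈ possible := by simpa using hx
      have hstep : ∀ st : Int × List String,
          (if possible.contains x.1 = true ∧ x.2 ≥ st.1 then
            if x.2 > st.1 then (x.2, [x.1]) else (st.1, st.2 ++ [x.1]) else st) = pvStepC st x := by
        intro st
        by_cases h : x.2 ≥ st.1 <;> simp [pvStepC, hx', h]
      rw [List.filter_cons_of_pos (by simpa using hx), List.foldl_cons, List.foldl_cons, hstep, ih]
    · rw [List.filter_cons_of_neg (by simpa using hx), List.foldl_cons,
        if_neg (by simp; exact fun hmem => absurd hmem (by simpa using hx)), ih]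

theorem pv_le_foldMax : ∀ (l : List (String × Int)) (a : Int), a ≤ pvFoldMax a l := by
  intro l
  induction l with
  | nil => intro a; simp [pvFoldMax]
  | cons x xs ih =>
    intro a
    have := ih (max a x.2)
    simp only [pvFoldMax, List.foldl_cons] at *
    exact le_trans (le_max_left a x.2) this

theorem pv_mem_le_foldMax : ∀ (l : List (String × Int)) (a : Int) (kv : String × Int),
    kv ∈ l → kv.2 ≤ pvFoldMax a l := by
  intro l
  induction l with
  | nil => intro a kv h; cases h
  | cons x xs ih =>
    intro a kv h
    rcases List.mem_cons.1 h with h | h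
    · subst h
      have := pv_le_foldMax xs (max a kv.2)
      simp only [pvFoldMax, List.foldl_cons] at *
      exact le_trans (le_max_right a kv.2) this
    · exact ih (max a x.2) kv h

theorem pv_foldMax_comm : ∀ (l : List (String × Int)) (a b : Int),
    pvFoldMax (max a b) l = max a (pvFoldMax b l) := by
  intro l
  induction l with
  | nil => intro a b; rfl
  | cons x xs ih =>
    intro a b
    simp only [pvFoldMax, List.foldl_cons] at *
    rw [max_assoc, ih]

theorem pv_foldMax_attained : ∀ (l : List (String × Int)) (b : Int),
    pvFoldMax b l = b ∨ ∃ kv ∈ l, pvFoldMax b l = kv.2 := by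
  intro l
  induction l with
  | nil => intro b; left; rfl
  | cons x xs ih =>
    intro b
    simp only [pvFoldMax, List.foldl_cons] at *
    rcases ih (max b x.2) with h | ⟨kv, hkv, h⟩
    · rcases max_choice b x.2 with hm | hm
      · left; rw [h, hm]
      · right; exact ⟨x, List.mem_cons_self, by rw [h, hm]⟩
    · right; exact ⟨kv, List.mem_cons_of_mem _ hkv, h⟩

-- Phase 1: the interleaved argmax loop computes (max, keys attaining the max).
theorem pv_phase1 : ∀ (c : List (String × Int)),
    c.foldl pvStepC (-1, []) =
      (pvFoldMax (-1) c, (c.filter (fun kv => kv.2 = pvFoldMax (-1) c)).map Prod.fst) := by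
  intro c
  induction c using List.reverseRecOn with
  | nil => rfl
  | append_singleton c x ih =>
    have hM : pvFoldMax (-1) (c ++ [x]) = max (pvFoldMax (-1) c) x.2 := by
      simp [pvFoldMax, List.foldl_append]
    rw [List.foldl_append, ih]
    rcases lt_trichotomy x.2 (pvFoldMax (-1) c) with hlt | heq | hgt
    · have hne : ¬ (x.2 = pvFoldMax (-1) c) := ne_of_lt hlt
      simp [pvStepC, List.foldl_cons, not_le.2 hlt, hM, max_eq_left (le_of_lt hlt),
        List.filter_append, hne]
    · have hle : pvFoldMax (-1) c ≤ x.2 := le_of_eq heq.symm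
      simp [pvStepC, heq, hM, List.filter_append]
    · have hle : pvFoldMax (-1) c ≤ x.2 := le_of_lt hgt
      simp only [pvStepC, List.foldl_cons, List.foldl_nil, if_pos hle, if_pos hgt, hM,
        max_eq_right hle, List.filter_append, List.filter_cons]
      have hfil : c.filter (fun kv => decide (kv.2 = x.2)) = [] := by
        rw [List.filter_eq_nil_iff]
        intro kv hkv
        have h1 : kv.2 ≤ pvFoldMax (-1) c := pv_mem_le_foldMax c (-1) kv hkv
        simp [ne_of_lt (lt_of_le_of_lt h1 hgt)]
      simp [hfil]

-- Phase 2: A's early-return loop equals B's next(...) search.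
theorem pv_loop_bridge (oddsOffset : List (String × Int)) (newValue : Int) :
    ∀ (l : List String) (first : String),
      fillAOffsetLoop oddsOffset newValue first l =
        match findNonzeroOffset oddsOffset l with
        | none => none
        | some (some w) => some [(w, newValue)]
        | some none => some [(first, newValue)] := by
  intro l
  induction l with
  | nil => intro first; rfl
  | cons k rest ih =>
    intro first
    simp only [fillAOffsetLoop, findNonzeroOffset]
    cases List.lookup k oddsOffset with
    | none => rfl
    | some v =>
      by_cases hv : v ≠ 0
      · simp [hv]
      · simp [hv, ih]

-- A key present in an association list has a successful lookup.
theorem pv_lookup_isSome : ∀ (l : List (String × Int)) (k : String),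
    k ∈ l.map Prod.fst → (List.lookup k l).isSome := by
  intro l
  induction l with
  | nil => intro k h; cases h
  | cons p ps ih =>
    intro k h
    simp only [List.map_cons, List.mem_cons] at h
    by_cases hk : k = p.1
    · simp [List.lookup, hk]
    · have hk' : (k == p.1) = false := by simpa using hk
      rcases h with h | h
      · exact absurd h hk
      · simpa [List.lookup, hk'] using ih k h

-- B's next(...) search cannot hit a KeyError when every key is present.
theorem pv_find_ne_none (oddsOffset : List (String × Int)) :
    ∀ (l : List String), (∀ k ∈ l, k ∈ oddsOffset.map Prod.fst) →
      findNonzeroOffset oddsOffset l ≠ none := by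
  intro l
  induction l with
  | nil => intro _ h; simp [findNonzeroOffset] at h
  | cons k rest ih =>
    intro h
    have hk := pv_lookup_isSome oddsOffset k (h k List.mem_cons_self)
    simp only [findNonzeroOffset]
    cases hlk : List.lookup k oddsOffset with
    | none => rw [hlk] at hk; simp at hk
    | some v =>
      by_cases hv : v ≠ 0
      · simp [hv]
      · simpa [hv] using ih (fun x hx => h x (List.mem_cons_of_mem _ hx))

theorem fillMaxOdds_spec : Claim_unchanged_fillMaxOdds := by
  unfold Claim_unchanged_fillMaxOdds
  intro odds oddsOffset newValue possible _ _
  unfold Spec_fillMaxOdds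
  intro hnD
  simp only [fillMaxOdds, fillMaxOdds_alt]
  rw [pv_fold_filter, pv_phase1]
  cases hc : odds.filter (fun kv => possible.contains kv.1) with
  | nil => rfl
  | cons c cs =>
    dsimp only
    -- outside D_ with candidates present, the candidate maximum is ≥ -1
    have hm : ¬ cs.foldl (fun a kv => max a kv.2) c.2 < -1 := by
      intro hlt
      apply hnD
      refine ⟨by rw [hc]; exact List.cons_ne_nil c cs, ?_⟩
      rw [hc, List.all_eq_true]
      intro kv hkv
      have h1 : kv.2 ≤ pvFoldMax c.2 cs := by
        rcases List.mem_cons.1 hkv with h | h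
        · subst h; exact pv_le_foldMax cs kv.2
        · exact pv_mem_le_foldMax cs c.2 kv h
      exact decide_eq_true (lt_of_le_of_lt h1 hlt)
    have hM : pvFoldMax (-1) (c :: cs) = cs.foldl (fun a kv => max a kv.2) c.2 := by
      have h1 : pvFoldMax (-1) (c :: cs) = max (-1) (pvFoldMax c.2 cs) := by
        simp only [pvFoldMax, List.foldl_cons]
        exact pv_foldMax_comm cs (-1) c.2
      rw [h1]
      exact max_eq_right (not_lt.1 hm)
    have hne : (c :: cs).filter (fun kv => decide (kv.2 = cs.foldl (fun a kv => max a kv.2) c.2)) ≠ [] := by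
      intro hnil
      have hall := List.filter_eq_nil_iff.1 hnil
      rcases pv_foldMax_attained cs c.2 with h | ⟨kv, hkv, h⟩
      · have h2 := hall c List.mem_cons_self
        simp only [decide_eq_true_eq] at h2
        exact h2 h.symm
      · have h2 := hall kv (List.mem_cons_of_mem _ hkv)
        simp only [decide_eq_true_eq] at h2
        exact h2 h.symm
    rw [hM]
    cases hfil : (c :: cs).filter (fun kv => decide (kv.2 = cs.foldl (fun a kv => max a kv.2) c.2)) with
    | nil => exact absurd hfil hne
    | cons t rest =>
      cases rest with
      | nil => simp
      | cons r rs =>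
        simp only [List.map_cons, List.length_cons]
        rw [if_pos (by omega), if_neg (by omega : ¬ ((rs.map Prod.fst).length + 1 + 1 = 1))]
        rw [pv_loop_bridge]

theorem fillMaxOdds_changed : Claim_changed_fillMaxOdds := by
  unfold Claim_changed_fillMaxOdds; decide

theorem fillMaxOdds_tight : Claim_exact_fillMaxOdds := by
  unfold Claim_exact_fillMaxOdds
  intro odds oddsOffset newValue possible _ hPre hD
  rcases hPre with ⟨hnodupO, _, hPre3⟩
  rcases hD with ⟨hne0, hall⟩
  simp only [fillMaxOdds, fillMaxOdds_alt]
  rw [pv_fold_filter, pv_phase1]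
  cases hc : odds.filter (fun kv => possible.contains kv.1) with
  | nil => exact absurd hc hne0
  | cons c cs =>
    dsimp only
    have hallc : ∀ kv ∈ (c :: cs : List (String × Int)), kv.2 < -1 := by
      intro kv hkv
      have := List.all_eq_true.1 (by rw [hc] at hall; exact hall) kv hkv
      simpa using this
    have hMlt : pvFoldMax c.2 cs < -1 := by
      rcases pv_foldMax_attained cs c.2 with h | ⟨kv, hkv, h⟩
      · rw [h]; exact hallc c List.mem_cons_self
      · rw [h]; exact hallc kv (List.mem_cons_of_mem _ hkv)
    -- A's side returns none: its max stays at the -1 seed, no candidate attains it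
    have hM1 : pvFoldMax (-1) (c :: cs) = -1 := by
      have h1 : pvFoldMax (-1) (c :: cs) = max (-1) (pvFoldMax c.2 cs) := by
        simp only [pvFoldMax, List.foldl_cons]
        exact pv_foldMax_comm cs (-1) c.2
      rw [h1]
      exact max_eq_left (le_of_lt hMlt)
    have hfilA : (c :: cs).filter (fun kv => decide (kv.2 = pvFoldMax (-1) (c :: cs))) = [] := by
      rw [List.filter_eq_nil_iff]
      intro kv hkv
      have := hallc kv hkv
      rw [hM1]
      simp only [decide_eq_true_eq]
      omega
    rw [hfilA]
    simp only [List.map_nil, List.length_nil]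
    norm_num
    -- B's side returns some _
    have hneB : (c :: cs).filter (fun kv => decide (kv.2 = cs.foldl (fun a kv => max a kv.2) c.2)) ≠ [] := by
      intro hnil
      have hallnil := List.filter_eq_nil_iff.1 hnil
      rcases pv_foldMax_attained cs c.2 with h | ⟨kv, hkv, h⟩
      · have h2 := hallnil c List.mem_cons_self
        simp only [decide_eq_true_eq] at h2
        exact h2 h.symm
      · have h2 := hallnil kv (List.mem_cons_of_mem _ hkv)
        simp only [decide_eq_true_eq] at h2
        exact h2 h.symm
    cases hfilB : (c :: cs).filter (fun kv => decide (kv.2 = cs.foldl (fun a kv => max a kv.2) c.2)) with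
    | nil => exact absurd hfilB hneB
    | cons t rest =>
      cases rest with
      | nil => simp
      | cons r rs =>
        -- every tied key is present in oddsOffset (Pre_'s third conjunct)
        have hmemKeys : ∀ p ∈ (t :: r :: rs : List (String × Int)), p.1 ∈ oddsOffset.map Prod.fst := by
          intro p hp
          have hpF : p ∈ (c :: cs).filter (fun kv => decide (kv.2 = cs.foldl (fun a kv => max a kv.2) c.2)) := by
            rw [hfilB]; exact hp
          have hpC := List.mem_filter.1 hpF
          have hpM : p.2 = cs.foldl (fun a kv => max a kv.2) c.2 := by simpa using hpC.2
          have hInOdds : ∀ x ∈ (c :: cs : List (String × Int)), x ∈ odds ∧ possible.contains x.1 = true := by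
            intro x hx
            have : x ∈ odds.filter (fun kv => possible.contains kv.1) := by rw [hc]; exact hx
            have h2 := List.mem_filter.1 this
            exact ⟨h2.1, by simpa using h2.2⟩
          have hpOdds := hInOdds p hpC.1
          -- the filtered key list has no duplicates, so the two heads differ
          have hsub1 : (c :: cs : List (String × Int)).Sublist odds := by
            rw [← hc]; exact List.filter_sublist
          have hsub : ((c :: cs).filter (fun kv => decide (kv.2 = cs.foldl (fun a kv => max a kv.2) c.2))).Sublist odds :=
            List.Sublist.trans List.filter_sublist hsub1
          have hnodupF : ((t :: r :: rs : List (String × Int)).map Prod.fst).Nodup := by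
            rw [← hfilB]
            exact (hsub.map Prod.fst).nodup hnodupO
          have htr : t.1 ≠ r.1 := by
            simp only [List.map_cons, List.nodup_cons, List.mem_cons] at hnodupF
            exact fun h => hnodupF.1 (Or.inl h)
          -- pick a second, distinct tied candidate q
          have htF : t ∈ (c :: cs : List (String × Int)) ∧ t.2 = cs.foldl (fun a kv => max a kv.2) c.2 := by
            have : t ∈ (c :: cs).filter (fun kv => decide (kv.2 = cs.foldl (fun a kv => max a kv.2) c.2)) := by
              rw [hfilB]; exact List.mem_cons_self
            have h2 := List.mem_filter.1 this
            exact ⟨h2.1, by simpa using h2.2⟩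
          have hrF : r ∈ (c :: cs : List (String × Int)) ∧ r.2 = cs.foldl (fun a kv => max a kv.2) c.2 := by
            have : r ∈ (c :: cs).filter (fun kv => decide (kv.2 = cs.foldl (fun a kv => max a kv.2) c.2)) := by
              rw [hfilB]; exact List.mem_cons_of_mem _ List.mem_cons_self
            have h2 := List.mem_filter.1 this
            exact ⟨h2.1, by simpa using h2.2⟩
          obtain ⟨q, hqC, hqM, hpq⟩ : ∃ q, (q ∈ (c :: cs : List (String × Int))) ∧
              q.2 = cs.foldl (fun a kv => max a kv.2) c.2 ∧ p ≠ q := by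
            by_cases hpt : p.1 = t.1
            · exact ⟨r, hrF.1, hrF.2, fun h => htr (hpt ▸ h ▸ rfl)⟩
            · exact ⟨t, htF.1, htF.2, fun h => hpt (h ▸ rfl)⟩
          have hqOdds := hInOdds q hqC
          -- all candidates are ≤ p's value
          have hAllLe : odds.all (fun x => !possible.contains x.1 || decide (x.2 ≤ p.2)) = true := by
            rw [List.all_eq_true]
            intro x hx
            by_cases hxp : possible.contains x.1 = true
            · have hxC : x ∈ (c :: cs : List (String × Int)) := by
                have : x ∈ odds.filter (fun kv => possible.contains kv.1) :=
                  List.mem_filter.2 ⟨hx, by simpa using hxp⟩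
                rw [hc] at this; exact this
              have hle : x.2 ≤ pvFoldMax c.2 cs := by
                rcases List.mem_cons.1 hxC with h | h
                · subst h; exact pv_le_foldMax cs x.2
                · exact pv_mem_le_foldMax cs c.2 x h
              simp only [Bool.or_eq_true, decide_eq_true_eq]
              right
              rw [hpM]; exact hle
            · simp only [Bool.or_eq_true]
              exact Or.inl (by simpa using hxp)
          have h1 := List.all_eq_true.1 hPre3 p hpOdds.1
          have h2 := List.all_eq_true.1 h1 q hqOdds.1
          simp only [Bool.or_eq_true] at h2
          rcases h2 with ((((h | h) | h) | h) | h) | h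
          · simp only [Bool.not_eq_true', decide_eq_false_iff_not, not_not] at h
            exact absurd h hpq
          · simp only [Bool.not_eq_true'] at h
            rw [hpOdds.2] at h; cases h
          · simp only [Bool.not_eq_true'] at h
            rw [hqOdds.2] at h; cases h
          · simp only [Bool.not_eq_true'] at h
            rw [hAllLe] at h; cases h
          · simp only [Bool.not_eq_true', decide_eq_false_iff_not] at h
            exact absurd (hpM.trans hqM.symm) h
          · simpa using h
        have hfind := pv_find_ne_none oddsOffset ((t :: r :: rs).map Prod.fst)
          (by intro k hk
              rcases List.mem_map.1 hk with ⟨p, hp, hpk⟩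
              exact hpk ▸ hmemKeys p hp)
        simp only [List.map_cons, List.length_cons]
        rw [if_neg (by omega : ¬ (rs.length + 1 + 1 = 1))]
        intro hEq
        cases hF : findNonzeroOffset oddsOffset (t.1 :: r.1 :: rs.map Prod.fst) with
        | none => exact hfind (by simpa using hF)
        | some w =>
          rw [hF] at hEq
          cases w <;> simp at hEq
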